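/- GENERATED by mk_final_copies.py from the proof of the farm's unit `start_decoder.F2b` (farm:start_decoder.F2b.1: Proof.lean) as the
   re-elaboration sweep compiled it — do not edit. -/
import Asan.CheckWalk
import Vorbis.Spec.Units.start_decoder_F2b
import Vorbis.Spec.StartDecoderFloor

open X86 X86.User Asan Vorbis Vorbis.Spec Vorbis.Spec.StartDecoder

set_option maxRecDepth 100000
set_option maxHeartbeats 4000000

namespace Vorbis.Spec.start_decoder_F2b

/-! ### Arithmetic of the segment's addresses and values -/

/-- The address of `floor_types[i]` as `lea rax,[r12+r12] ; lea rdi,[rbp+rax+4]` computes it (the check's argument, 0x1152a2). -/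
theorem f2b_addr_lea (p : Word) (i f : Nat) (hp : p.toNat = f) (hf : f + 1808 ≤ 0xC00000) (hi : i ≤ 63) :
    (p + (UInt64.ofNat i + 88 + (UInt64.ofNat i + 88)) + 4).toNat = f + 180 + 2 * i := by
  u_omega

/-- The address of `floor_types[i]` as `mov [rbp+r12*2+4], bx` computes it (the store, 0x1152ac). -/
theorem f2b_addr_sib (p : Word) (i f : Nat) (hp : p.toNat = f) (hf : f + 1808 ≤ 0xC00000) (hi : i ≤ 63) :
    (p + (UInt64.ofNat i + 88) * 2 + 4).toNat = f + 180 + 2 * i := by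
  u_omega

/-- The word `bx` of a `get_bits(f, 16)`: the sixteen bits. -/
theorem f2b_word (z : Nat) (hz : z < 2 ^ 16) : (BitVec.setWidth 16 (Word.part .w32 (UInt64.ofNat z))).toNat = z := by
  rw [BitVec.toNat_setWidth, Vorbis.toNat_part32, Code.toNat_ofNat_lt _ (by omega)]
  omega

/-- `imul rbx, rbx, 63CH ; add rbx, [rbp+138H]`: the element `g(i) = floor_config + 1596·i` (no wrap: the block is in the data space). -/
theorem f2b_elem (i cfg : Nat) (hi : i ≤ 63) (hc : cfg + 1596 * i ≤ 0xC00000) :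
    UInt64.ofNat i * 1596 + UInt64.ofNat cfg = addr (cfg + 1596 * i) := by
  apply eq_addr
  u_omega

/-! ### The floor layer for the store of `floor_types[i]` (no reader call) -/

/-- **A window that the segment writes outside a reader call**: the stack below `[R + 8]` (pushed return addresses, `error`'s
frame), `error`'s word `[f+136, f+144)`, the word `floor_types[i]`. None meets a field `Bits` reads. -/
def QuietT (g : Ghost) (i : Nat) (w : Span) : Prop :=
  (g.RA - 1888 ≤ w.lo ∧ w.hi ≤ g.R + 8) ∨ (g.f + 136 ≤ w.lo ∧ w.hi ≤ g.f + 144) ∨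
  (g.f + 180 + 2 * i ≤ w.lo ∧ w.hi ≤ g.f + 182 + 2 * i)

/-- A `QuietT` window is a `Floor.WinT` window (no part of the element is written). -/
theorem QuietT.winT {g : Ghost} {i G : Nat} {w : Span} (h : QuietT g i w) : Floor.WinT g i G 1596 1596 w := by
  unfold QuietT at h
  unfold Floor.WinT Floor.Win
  omega

/-- **`Bits` over `QuietT` windows**: the four ranges of `*f` that `Bits` reads are the same (`Bits.frame_fields`; the word
`floor_types[i]` lies in `[f+180, f+308)`). -/
theorem bits_quietT {g : Ghost} {A : Arena × List Obj} {mem mem' : Mem} {i : Nat} {ws : List Span} {Blk : Block → Prop} {len : Nat}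
    (geo : Floor.Geo g A mem i) (hb : Bits Blk len mem g.f) (hs : Mem.SameExcept ws mem mem')
    (hw : ∀ w, w ∈ ws → QuietT g i w) : Bits Blk len mem' g.f := by
  obtain ⟨r8, rlo, rhi, ra, flo, fhi, fstack, farena, flog, fc1, fc64, ilt, gdef, blo, bhi, btext, bstack, bdata, blog⟩ := geo
  apply hb.frame_fields
  apply Bits.SameFields.of_sameExcept hs
  · intro w hw'
    have hc := hw w hw'
    unfold QuietT at hc
    omega
  · intro w hw'
    have hc := hw w hw'
    unfold QuietT at hc
    omega
  · intro w hw'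
    have hc := hw w hw'
    unfold QuietT at hc
    omega
  · intro w hw'
    have hc := hw w hw'
    unfold QuietT at hc
    omega

/-- **The frame lemma of the floor loop for this segment's own stores** (`Floor.carry_t` with `Bits` from the windows). -/
theorem carry_quietT {u₀ : State} {g : Ghost} {pc pc' : Word} {i : Nat} {A5 : Arena} {A : Arena × List Obj} {v s : State}
    {ws : List Span} (h : FloorLoop u₀ g pc i A5 A v) (hlt : (i : Int) < stb_vorbis.floor_count v.mem g.f)
    (hrip : s.rip = pc') (hrsp : s.reg .rsp = addr g.R) (hrbp : s.reg .rbp = addr g.f) (hinv : abiInv s)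
    (hcode : CodeOK u₀ s.mem) (hs : Mem.SameExcept ws v.mem s.mem) (hw : ∀ w, w ∈ ws → QuietT g i w)
    (hun : ShadowUntouched v.mem s.mem) : FloorLoop u₀ g pc' i A5 A s :=
  Floor.carry_t (lo := 1596) (hi := 1596) h hlt (Nat.le_refl _) hrip hrsp hrbp hinv hcode hs (fun w hw' => (hw w hw').winT) hun
    (bits_quietT (Floor.geo h hlt) h.mid.bits hs hw)

/-- **The return of `error(f, VORBIS_invalid_setup)`, 0x115326 (`cut193`)** (private to this unit): the loop assertion at this
address and eax = 0. -/
structure MidErr (u₀ : State) (g : Ghost) (i : Nat) (A5 : Arena) (A : Arena × List Obj) (v : State) : Prop where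
  loop : FloorLoop u₀ g L.start_decoder.cut193 i A5 A v
  rax : v.reg .rax = 0

/-- **The walk of the segment** (0x115293 … 0x1152e4, the stub 0x115319 … 0x115321). -/
theorem f2b_walk (Lay : Layout) (hLay : Lay.hi = 0x1000000) (μ : Microarch) (hμ : UserX.MicroOK μ) (u₀ : State)
    (hcode : HasCodeNat Lay u₀ Vorbis.L.start_decoder.entry Vorbis.Code.code_start_decoder.nat Vorbis.L.start_decoder.size)
    (h_gb : ∀ (others : List Obj) (frames : List (Nat × FrameLayout)) (Blk : Block → Prop) (len : Nat),
      Calls Lay μ Vorbis.WayInv (Vorbis.conv u₀) Vorbis.L.get_bits.entry (Vorbis.Spec.get_bits.spec others frames Blk len))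
    (hstore2 : Asan.SmallCheck Lay μ Vorbis.WayInv (Vorbis.CodeOK u₀) [.rax, .rcx, .rdx] 2 Vorbis.L.__asan_store2_noabort.entry)
    (hload8 : Asan.SmallCheck Lay μ Vorbis.WayInv (Vorbis.CodeOK u₀) [.rax, .rcx, .rdx] 8 Vorbis.L.__asan_load8_noabort.entry)
    (h_error : ∀ (others : List Obj) (frames : List (Nat × FrameLayout)),
      Calls Lay μ Vorbis.WayInv (Vorbis.conv u₀) Vorbis.L.error.entry (Vorbis.Spec.error.spec others frames))
    (g : Ghost) (i : Nat) (A5 : Arena) (A : Arena × List Obj) (v : State)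
    (h : InF2a u₀ g i A5 A v) :
    ReachVia Lay μ WayInv v (fun w => MidErr u₀ g i A5 A w ∨ AtF3 u₀ g i w ∨ AtF2b u₀ g i w) := by
  have hgb := h_gb A.2 g.frames' (g.Blk A) g.len
  have herr := h_error A.2 g.frames'
  have hlt : (i : Int) < stb_vorbis.floor_count v.mem g.f := h.lt
  have hgeo := Floor.geo h.loop hlt
  have hgeo0 := hgeo
  obtain ⟨r8, rlo, rhi, ra, flo, fhi, fstack, farena, flog, fc1, fc64, ilt, gdef, blo, bhi, btext, bstack, bdata, blog⟩ := hgeo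
  have hfr := h.loop.frame
  have hi31 : i < 2 ^ 31 := by omega
  have hi63 : i ≤ 63 := by omega
  -- the steady stack pointer and `f`: `v.reg .rsp`, `v.reg .rbp` stay the atoms of the walk
  have hspn : (v.reg .rsp).toNat = g.R := by
    rw [hfr.rsp]
    exact toNat_addr _ (by omega)
  have hfn : (v.reg .rbp).toNat = g.f := by
    rw [h.loop.rbp]
    exact toNat_addr _ (by omega)
  obtain ⟨G, hG⟩ : ∃ G : Nat, G = floorAt g v.mem i := ⟨_, rfl⟩
  rw [← hG] at gdef
  obtain ⟨cfg, hcfg⟩ : ∃ cfg : Nat, cfg = stb_vorbis.floor_config v.mem g.f := ⟨_, rfl⟩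
  obtain ⟨fc, hfc⟩ : ∃ fc : Int, fc = stb_vorbis.floor_count v.mem g.f := ⟨_, rfl⟩
  rw [← hcfg] at gdef blo bhi bstack bdata blog
  rw [← hfc] at fc1 fc64 ilt bhi bstack bdata blog
  obtain ⟨z, hz, hrax⟩ : ∃ z, z < 2 ^ 16 ∧ v.reg .rax = UInt64.ofNat z := ⟨_, h.rax, (UInt64.ofNat_toNat).symm⟩
  -- the loads: the counter `i` in `d[R + 18H]`, `floor_config`
  have r_cnt : v.mem.readLE (v.reg .rsp + 24) 4 = i := by
    have hc := h.loop.cnt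
    rw [hfr.rsp]
    simp only [vfield]
    exact hc
  have r_cfg : v.mem.readLE (v.reg .rbp + 312) 8 = cfg := by
    rw [hcfg, h.loop.rbp]
    simp only [vacc, voff, vfield]
  have w_rip := hfr.rip
  have w_eq : Mem.EqOn Vorbis.L.textLo Vorbis.L.textHi u₀.mem v.mem := hfr.code
  have hdf : v.flags .df = false := (show abiInv _ from hfr.inv).1
  have hmx : v.mxcsr &&& 0x1F80 = 0x1F80 := (show abiInv _ from hfr.inv).2
  have hsse := Vorbis.sseOK_of_abiInv hfr.inv
  u_walk hcode [hμ.vendor, Vorbis.Spec.cnt32_sext_bv i hi31] until [Vorbis.L.start_decoder.cut193, Vorbis.L.start_decoder.cut194, Vorbis.L.start_decoder.cut191] span [Vorbis.L.textLo, Vorbis.L.textHi] side (v_side)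
  case check_1152a7 =>
    -- 0x1152a7: store2 `f->floor_types[i]`, a field of `*f` (OB1, `i < 64`)
    have hT1 := f2b_addr_lea (v.reg .rbp) i g.f hfn fhi hi63
    have hun : ShadowUntouched v.mem s_1152a7.mem := by v_untouched
    have hs : Site (Asan.Live (stackObjs g.frames' ++ A.2)) (g.f + 180 + 2 * i) 2 :=
      Vorbis.site_floor_types (i := i) h.loop.mid.env.live h.loop.mid.bits.OB1 (by simp only [voff]; omega) (by simp only [voff])
    exact Vorbis.Spec.check_site hfr.shadow hun hs hT1
  case call_inv =>
    v_inv
  case pre_115321 =>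
    -- `error(f, VORBIS_invalid_setup)`: the shadow clause, OB1
    have hT2 := f2b_addr_sib (v.reg .rbp) i g.f hfn fhi hi63
    generalize v.reg .rbp + (UInt64.ofNat i + 88) * 2 + 4 = T2 at *
    have hun : ShadowUntouched v.mem s_115321.mem := by v_untouched
    have hrdi : (s_115321.reg .rdi).toNat = g.f := by
      rw [w_rdi]
      exact hfn
    refine Floor.error_pre h.loop ?_ hun hrdi
    rw [w_rsp]
    u_omega
  case check_1152c4 =>
    -- 0x1152c4: load8 `f->floor_config`, a field of `*f` (OB1)
    have hT2 := f2b_addr_sib (v.reg .rbp) i g.f hfn fhi hi63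
    generalize v.reg .rbp + (UInt64.ofNat i + 88) * 2 + 4 = T2 at *
    have hun : ShadowUntouched v.mem s_1152c4.mem := by v_untouched
    have hs : Site (Asan.Live (stackObjs g.frames' ++ A.2)) (g.f + 312) 8 :=
      Vorbis.site_floor_config h.loop.mid.env.live h.loop.mid.bits.OB1 (by simp only [voff])
    exact Vorbis.Spec.check_site hfr.shadow hun hs (by u_omega)
  case call_inv =>
    v_inv
  case pre_1152e4 =>
    -- `ReaderPre` of `get_bits(f, 5)`: `Bits` over the store of `floor_types[i]` and the pushed return addresses
    have hT2 := f2b_addr_sib (v.reg .rbp) i g.f hfn fhi hi63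
    generalize v.reg .rbp + (UInt64.ofNat i + 88) * 2 + 4 = T2 at *
    have hun : ShadowUntouched v.mem s_1152e4.mem := by v_untouched
    have hrdi : (s_1152e4.reg .rdi).toNat = g.f := by
      rw [w_rdi]
      exact hfn
    refine ⟨Floor.reader_pre h.loop ?_ hun hrdi ?_, ?_⟩
    · rw [w_rsp]
      u_omega
    · have hs : Mem.SameExcept [⟨g.R - 8, g.R⟩, ⟨g.f + 180 + 2 * i, g.f + 182 + 2 * i⟩] v.mem s_1152e4.mem := by
        rw [w_mem]
        u_same
      refine bits_quietT hgeo0 h.loop.mid.bits hs ?_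
      intro w hwm
      simp only [List.mem_cons, List.mem_nil_iff, or_false] at hwm
      rcases hwm with rfl | rfl <;> unfold QuietT <;> simp only [] <;> omega
    · rw [bitsArg_def, w_rsi]
      decide
  · -- 0x115326: `error(f, VORBIS_invalid_setup)` returned (the word was `> 1`)
    v_after_call w_rsp_115321 w_mem_115321
    simp only [w_rdi_115321] at w_same
    obtain ⟨hrax0, hpu, _⟩ := w_post
    have hT2 := f2b_addr_sib (v.reg .rbp) i g.f hfn fhi hi63
    generalize v.reg .rbp + (UInt64.ofNat i + 88) * 2 + 4 = T2 at *
    have hun0 : ShadowUntouched v.mem s_115321.mem := by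
      rw [w_mem_115321]
      v_untouched
    have hun : ShadowUntouched v.mem s_115321r.mem := Mem.EqOn.trans hun0 hpu
    have hs : Mem.SameExcept [⟨g.R - 56, g.R⟩, ⟨g.f + 140, g.f + 144⟩, ⟨g.f + 180 + 2 * i, g.f + 182 + 2 * i⟩]
        v.mem s_115321r.mem := by
      u_same
    have hws : ∀ w, w ∈ ([⟨g.R - 56, g.R⟩, ⟨g.f + 140, g.f + 144⟩, ⟨g.f + 180 + 2 * i, g.f + 182 + 2 * i⟩] : List Span) →
        QuietT g i w := by
      intro w hwm
      simp only [List.mem_cons, List.mem_nil_iff, or_false] at hwm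
      rcases hwm with rfl | rfl | rfl <;> unfold QuietT <;> simp only [] <;> omega
    have hrsp' : s_115321r.reg .rsp = addr g.R := by
      rw [← hfr.rsp, w_rsp]
    have hrbp' : s_115321r.reg .rbp = addr g.f := by
      rw [w_kept .rbp rfl]
      exact h.loop.rbp
    have hloop' : FloorLoop u₀ g Vorbis.L.start_decoder.cut193 i A5 A s_115321r :=
      carry_quietT h.loop hlt w_rip hrsp' hrbp' w_inv w_eq hs hws hun
    exact ReachVia.done (Or.inl ⟨hloop', hrax0⟩)
  · -- 0x1152bb `je 11532b` taken: a floor of type 0, the entry of F3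
    have hT2 := f2b_addr_sib (v.reg .rbp) i g.f hfn fhi hi63
    generalize v.reg .rbp + (UInt64.ofNat i + 88) * 2 + 4 = T2 at *
    have hun : ShadowUntouched v.mem s_1152bb.mem := by v_untouched
    have hs : Mem.SameExcept [⟨g.R - 8, g.R⟩, ⟨g.f + 180 + 2 * i, g.f + 182 + 2 * i⟩] v.mem s_1152bb.mem := by
      rw [w_mem]
      u_same
    have hws : ∀ w, w ∈ ([⟨g.R - 8, g.R⟩, ⟨g.f + 180 + 2 * i, g.f + 182 + 2 * i⟩] : List Span) → QuietT g i w := by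
      intro w hwm
      simp only [List.mem_cons, List.mem_nil_iff, or_false] at hwm
      rcases hwm with rfl | rfl <;> unfold QuietT <;> simp only [] <;> omega
    have hrsp' : s_1152bb.reg .rsp = addr g.R := by
      rw [w_rsp]
      exact hfr.rsp
    have hrbp' : s_1152bb.reg .rbp = addr g.f := by
      rw [w_kept.get .rbp rfl]
      exact h.loop.rbp
    have hloop' : FloorLoop u₀ g pc_F3 i A5 A s_1152bb :=
      carry_quietT h.loop hlt w_rip hrsp' hrbp' (by v_inv) w_eq hs hws hun
    obtain ⟨ecount, _, _, _, _⟩ := Floor.hdr_same hgeo0 hs (fun w hw' => (hws w hw').winT) (Nat.le_refl _)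
    refine ReachVia.done (Or.inr (Or.inl (F2.atF3_of_loop hloop' ?_)))
    rw [ecount]
    exact hlt
  · -- 0x1152e9: `get_bits(f, 5)` returned (the word was 1)
    v_after_call w_rsp_1152e4 w_mem_1152e4
    simp only [w_rdi_1152e4] at w_same
    have hpost : GetBitsSpecPost (g.Blk A) g.len (s_1152e4.reg .rdi).toNat (bitsArg s_1152e4) s_1152e4 s_1152e4r := w_post
    have hrdi : (s_1152e4.reg .rdi).toNat = g.f := by
      rw [w_rdi_1152e4]
      exact hfn
    have harg : bitsArg s_1152e4 = 5 := by
      rw [bitsArg_def, w_rsi_1152e4]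
      rfl
    rw [hrdi, harg] at hpost
    have hz1 : z = 1 := by
      rw [f2b_word z hz] at hbr_1152b6 hbr_1152bb
      omega
    have hZ : (BitVec.setWidth 16 (Word.part .w32 (UInt64.ofNat z))).toNat = 1 := by
      rw [f2b_word z hz]
      exact hz1
    have hT2 := f2b_addr_sib (v.reg .rbp) i g.f hfn fhi hi63
    generalize v.reg .rbp + (UInt64.ofNat i + 88) * 2 + 4 = T2 at *
    generalize (BitVec.setWidth 16 (Word.part .w32 (UInt64.ofNat z))).toNat = Z at *
    subst hZ
    have hun0 : ShadowUntouched v.mem s_1152e4.mem := by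
      rw [w_mem_1152e4]
      v_untouched
    have hun : ShadowUntouched v.mem s_1152e4r.mem := Mem.EqOn.trans hun0 hpost.untouched
    -- `floor_config` read through the store of `floor_types[i]`
    have hrd : ((v.mem.writeLE (v.reg .rsp - 8) 8 1135276).writeLE T2 2 1).readLE (v.reg .rbp + 312) 8 = cfg := by
      u_read
    rw [hrd] at w_rbx
    -- the word `floor_types[i]` just stored, read back after the callee
    have hp1 : s_1152e4.mem.readLE T2 2 = 1 := by
      rw [w_mem_1152e4]
      u_read
    rw [w_mem_1152e4] at hp1
    have ht : s_1152e4r.mem.readLE T2 2 = 1 := by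
      u_frame hp1
    have hsame : Mem.SameExcept
        [⟨g.R - 408, g.R⟩, ⟨g.f + 48, g.f + 56⟩, ⟨g.f + 84, g.f + 96⟩, ⟨g.f + 136, g.f + 144⟩,
         ⟨g.f + 1484, g.f + 1749⟩, ⟨g.f + 1752, g.f + 1784⟩, ⟨g.f + 180 + 2 * i, g.f + 182 + 2 * i⟩]
        v.mem s_1152e4r.mem := by
      u_same
    have hws : ∀ w, w ∈ ([⟨g.R - 408, g.R⟩, ⟨g.f + 48, g.f + 56⟩, ⟨g.f + 84, g.f + 96⟩, ⟨g.f + 136, g.f + 144⟩,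
         ⟨g.f + 1484, g.f + 1749⟩, ⟨g.f + 1752, g.f + 1784⟩, ⟨g.f + 180 + 2 * i, g.f + 182 + 2 * i⟩] : List Span) →
        Floor.WinT g i (floorAt g v.mem i) 1596 1596 w := by
      intro w hwm
      simp only [List.mem_cons, List.mem_nil_iff, or_false] at hwm
      rcases hwm with rfl | rfl | rfl | rfl | rfl | rfl | rfl <;> unfold Floor.WinT Floor.Win <;> simp only [] <;> omega
    have hrsp' : s_1152e4r.reg .rsp = addr g.R := by
      rw [← hfr.rsp, w_rsp]
    have hrbp' : s_1152e4r.reg .rbp = addr g.f := by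
      rw [w_kept .rbp rfl]
      exact h.loop.rbp
    have hloop' : FloorLoop u₀ g Vorbis.L.start_decoder.cut191 i A5 A s_1152e4r :=
      Floor.carry_t (lo := 1596) (hi := 1596) h.loop hlt (Nat.le_refl _) w_rip hrsp' hrbp' w_inv w_eq hsame hws hun
        hpost.bits.bits
    obtain ⟨ecount, _, _, _, eG⟩ := Floor.hdr_same hgeo0 hsame hws (Nat.le_refl _)
    have hrax5 : (s_1152e4r.reg .rax).toNat < 32 := by
      have h2 := hpost.bits.result.2 (by decide)
      omega
    refine ReachVia.done (Or.inr (Or.inr ⟨A5, A, ?_⟩))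
    refine
      { loop := hloop'
        lt := by rw [ecount]; exact hlt
        FL3 := ?_
        rbx := ?_
        rax := hrax5 }
    · -- FL3(i): the word stored at 0x1152ac was 1
      have hT2e : T2 = addr (g.f + 180 + 2 * i) := eq_addr _ _ hT2
      simp only [vacc, voff]
      rw [hT2e] at ht
      exact ht
    · -- rbx = g(i) = floor_config + 1596·i
      rw [w_rbx, eG, ← hG, gdef]
      exact f2b_elem i cfg hi63 (by omega)

/-- **The stub's `jmp 113b22`** (0x115326): from the return of `error` to the epilogue with eax = 0; nothing is written. -/
theorem f2b_err (Lay : Layout) (hLay : Lay.hi = 0x1000000) (μ : Microarch) (hμ : UserX.MicroOK μ) (u₀ : State)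
    (hcode : HasCodeNat Lay u₀ Vorbis.L.start_decoder.entry Vorbis.Code.code_start_decoder.nat Vorbis.L.start_decoder.size)
    (g : Ghost) (i : Nat) (A5 : Arena) (A : Arena × List Obj) (v : State) (h : MidErr u₀ g i A5 A v) :
    ReachVia Lay μ WayInv v (fun w => AtERR u₀ g w) := by
  have hfr := h.loop.frame
  have he := hfr.entry
  v_entry he
  simp only [depth] at he_room he_stack
  have w_rip := hfr.rip
  have w_eq : Mem.EqOn Vorbis.L.textLo Vorbis.L.textHi u₀.mem v.mem := hfr.code
  have hdf : v.flags .df = false := (show abiInv _ from hfr.inv).1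
  have hmx : v.mxcsr &&& 0x1F80 = 0x1F80 := (show abiInv _ from hfr.inv).2
  have hsse := Vorbis.sseOK_of_abiInv hfr.inv
  u_walk hcode [hμ.vendor] until [pc_ERR] span [Vorbis.L.textLo, Vorbis.L.textHi] side (v_side)
  refine ReachVia.done (Floor.atERR (Floor.same_mem h.loop w_mem w_rip ?_ ?_ (by v_inv)) ?_)
  · rw [w_kept.get .rsp rfl]
    exact hfr.rsp
  · rw [w_kept.get .rbp rfl]
    exact h.loop.rbp
  · rw [w_kept.get .rax rfl, h.rax]
    rfl

end Vorbis.Spec.start_decoder_F2b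

theorem Vorbis.Spec.Worked.start_decoder_F2b_ok : Vorbis.Spec.start_decoder_F2b.Statement := by
  intro Lay hLay μ hμ u₀ hcode h_gb hstore2 hload8 h_error g i v hat
  obtain ⟨A5, A, h⟩ := hat
  refine (Vorbis.Spec.start_decoder_F2b.f2b_walk Lay hLay μ hμ u₀ hcode h_gb hstore2 hload8 h_error g i A5 A v h).trans ?_
  intro w hw
  rcases hw with hm | h3 | hb
  · exact (Vorbis.Spec.start_decoder_F2b.f2b_err Lay hLay μ hμ u₀ hcode g i A5 A w hm).mono
      (fun w' h' => Or.inl h')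
  · exact ReachVia.done (Or.inr (Or.inl h3))
  · exact ReachVia.done (Or.inr (Or.inr hb))
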